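-- pv_equiv track=rewrite | github.com/yoyodahary/ReaserchProject | useful_functions.py | stat_third
-- ===== SOURCE A (Python) =====
-- def stat_third(rep,k = 2):
--   sum = 0
--   for i in range(len(rep)):
--     for j in range(i+1,len(rep)):
--       if rep[i]>rep[j] and rep[j]%3==1:
--         sum += 1
--   for i in range(len(rep)-1):
--     if rep[i]>rep[i+1] and rep[i+1]%3==0:
--       sum+=i+1
--   return sum
-- ===== SOURCE B (Python) =====
-- def _bisect_right(a, x):
--     # standard bisect_right loop (module imports are not available here)
--     lo, hi = 0, len(a)
--     while lo < hi:
--         mid = (lo + hi) // 2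
--         if x < a[mid]:
--             hi = mid
--         else:
--             lo = mid + 1
--     return lo
--
--
-- def stat_third(rep, k=2):
--     # one pass: keep a sorted list of the elements seen so far; for each x with
--     # x % 3 == 1 count the earlier elements greater than x by binary search,
--     # and fuse the descent-position sum into the same pass.
--     total = 0
--     pre = []          # sorted multiset of rep[:j]
--     prev = None
--     for j, x in enumerate(rep):
--         pos = _bisect_right(pre, x)
--         if x % 3 == 1:
--             total += len(pre) - pos
--         if j > 0 and prev > x and x % 3 == 0:
--             total += j
--         pre.insert(pos, x)
--         prev = x
--     return total
-- ===== Notes on version B (the rewrite author's own statement) =====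
-- stated objective: faster
-- what changed: A's O(n^2) nested index scan is replaced by a single left-to-right pass that maintains a sorted list of the elements seen so far, counts greater earlier elements via a hand-written binary search (bisect_right), and fuses the weighted descent sum into the same pass.
import Mathlib
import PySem

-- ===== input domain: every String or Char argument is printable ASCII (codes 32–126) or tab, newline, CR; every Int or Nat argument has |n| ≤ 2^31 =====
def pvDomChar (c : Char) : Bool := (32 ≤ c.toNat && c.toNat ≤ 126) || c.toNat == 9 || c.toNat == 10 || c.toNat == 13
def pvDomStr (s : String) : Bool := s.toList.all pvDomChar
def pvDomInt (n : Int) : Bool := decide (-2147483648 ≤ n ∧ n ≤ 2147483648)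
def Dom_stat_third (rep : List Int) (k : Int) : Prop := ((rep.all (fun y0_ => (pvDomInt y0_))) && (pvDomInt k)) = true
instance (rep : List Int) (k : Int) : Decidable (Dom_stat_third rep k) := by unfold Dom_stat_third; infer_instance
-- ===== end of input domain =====

-- B replaces A's quadratic double scan by a single pass that keeps a sorted list of the
-- elements seen so far and counts the greater earlier elements by binary search, fusing
-- the descent-position sum into the same pass (objective: faster).

-- ===== PORT A =====
def stat_third (rep : List Int) (k : Int) : Int :=
  let sum1 : Int :=
    (PySem.List.pyRange 0 (PySem.List.len rep) 1).foldl (fun sum i =>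
      (PySem.List.pyRange (i + 1) (PySem.List.len rep) 1).foldl (fun sum j =>
        if PySem.List.pyGetD rep i 0 > PySem.List.pyGetD rep j 0 ∧
            PySem.Int.mod (PySem.List.pyGetD rep j 0) 3 = 1 then sum + 1 else sum) sum) 0
  (PySem.List.pyRange 0 (PySem.List.len rep - 1) 1).foldl (fun sum i =>
    if PySem.List.pyGetD rep i 0 > PySem.List.pyGetD rep (i + 1) 0 ∧
        PySem.Int.mod (PySem.List.pyGetD rep (i + 1) 0) 3 = 0 then sum + (i + 1) else sum) sum1

-- ===== PORT B =====
-- Source B's hand-written _bisect_right is the standard lo/hi binary-search loop, which is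
-- exactly PySem.List.bisectRight; prev = none plays the role of Python's initial None
-- (Python never compares None: prev > x is reached only when j > 0, i.e. prev is set).
def stat_third_alt (rep : List Int) (k : Int) : Int :=
  ((PySem.List.enumerate rep 0).foldl
    (fun (st : Int × List Int × Option Int) (jx : Int × Int) =>
      let total : Int := st.1
      let pre : List Int := st.2.1
      let prev : Option Int := st.2.2
      let j : Int := jx.1
      let x : Int := jx.2
      let pos : Nat := PySem.List.bisectRight pre x
      let total : Int := if PySem.Int.mod x 3 = 1 then total + (PySem.List.len pre - (pos : Int)) else total
      let total : Int :=
        match prev with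
        | some p => if 0 < j ∧ p > x ∧ PySem.Int.mod x 3 = 0 then total + j else total
        | none => total
      (total, PySem.List.insert pre (pos : Int) x, some x))
    (0, [], none)).1

-- ===== PRECONDITION & SPEC =====
def Spec_stat_third (rep : List Int) (k : Int) (out : Int) : Prop := out = stat_third_alt rep k
instance (rep : List Int) (k : Int) (out : Int) : Decidable (Spec_stat_third rep k out) := by unfold Spec_stat_third; infer_instance

-- ===== CLAIM (what is proved, stated in full; the proofs are below) =====
def Claim_equal_stat_third : Prop := ∀ (rep : List Int) (k : Int), Dom_stat_third rep k → Spec_stat_third rep k (stat_third rep k)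

-- ===== LEMMAS AND PROOFS =====

-- the conditioned-inversion count, scanned from the left (A's first double loop)
def pairSum : List Int → Int
  | [] => 0
  | x :: xs => (xs.countP (fun y => decide (x > y ∧ PySem.Int.mod y 3 = 1)) : Int) + pairSum xs

-- the weighted descent sum over consecutive pairs, first pair at positions (j, j+1)
def pairsDesc : List Int → Nat → Int
  | x :: y :: rs, j => (if x > y ∧ PySem.Int.mod y 3 = 0 then (j : Int) + 1 else 0) + pairsDesc (y :: rs) (j + 1)
  | _, _ => 0

-- per-element contribution of B's counting step against the already-seen prefix `done`
def cntC (x : Int) (done : List Int) : Int :=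
  if PySem.Int.mod x 3 = 1 then (done.countP (fun y => decide (x < y)) : Int) else 0

-- B's counting component, prefix-directed
def Cfun : List Int → List Int → Int
  | _, [] => 0
  | done, x :: rs => cntC x done + Cfun (done ++ [x]) rs

-- B's descent component, carrying the previous element and the current index
def Dfun : Option Int → Nat → List Int → Int
  | _, _, [] => 0
  | prev, j, x :: rs =>
    (match prev with
     | some p => if p > x ∧ PySem.Int.mod x 3 = 0 then (j : Int) else 0
     | none => 0) + Dfun (some x) (j + 1) rs

-- cross contributions of the prefix `done` against the remaining list
def crossSum (done rest : List Int) : Int :=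
  (done.map (fun d => (rest.countP (fun y => decide (d > y ∧ PySem.Int.mod y 3 = 1)) : Int))).sum

theorem insert_take_drop (xs : List Int) (p : Nat) (v : Int) (h : p ≤ xs.length) :
    PySem.List.insert xs (p : Int) v = xs.take p ++ v :: xs.drop p := by
  unfold PySem.List.insert
  simp only [PySem.List.sliceIndices]
  have hk : (if (p:Int) < 0 then max ((p:Int) + xs.length) 0 else min (p:Int) (xs.length:Int)).toNat = p := by
    omega
  simp [hk]

theorem count_bisect (pre : List Int) (x : Int) (hs : pre.Pairwise (· ≤ ·)) :
    PySem.List.len pre - (PySem.List.bisectRight pre x : Int)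
      = (pre.countP (fun y => decide (x < y)) : Int) := by
  obtain ⟨hle, hlt, hgt⟩ := PySem.List.bisectRight_spec pre x hs
  set r := PySem.List.bisectRight pre x with hr
  have h1 : (pre.take r).countP (fun y => decide (x < y)) = 0 := by
    rw [List.countP_eq_zero]
    intro a ha
    obtain ⟨i, hi, hia⟩ := List.getElem_of_mem ha
    have hi' : i < pre.length := lt_of_lt_of_le hi (by simp)
    have := hlt i hi' (by simp at hi; omega)
    rw [List.getElem_take] at hia
    simp only [decide_eq_true_eq]
    omega
  have h2 : (pre.drop r).countP (fun y => decide (x < y)) = (pre.drop r).length := by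
    rw [List.countP_eq_length]
    intro a ha
    obtain ⟨i, hi, hia⟩ := List.getElem_of_mem ha
    rw [List.getElem_drop] at hia
    have := hgt (r + i) (by simp at hi; omega) (by omega)
    simp only [decide_eq_true_eq]
    omega
  have hc : pre.countP (fun y => decide (x < y)) = (pre.drop r).length := by
    conv_lhs => rw [← List.take_append_drop r pre]
    rw [List.countP_append, h1, h2, Nat.zero_add]
  rw [hc, PySem.List.len_eq, List.length_drop]
  omega

theorem insert_perm (pre : List Int) (x : Int) (hs : pre.Pairwise (· ≤ ·)) :
    (PySem.List.insert pre (PySem.List.bisectRight pre x : Int) x).Perm (x :: pre) := by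
  obtain ⟨hle, hlt, hgt⟩ := PySem.List.bisectRight_spec pre x hs
  rw [insert_take_drop pre _ x hle]
  calc (pre.take _ ++ x :: pre.drop _).Perm (x :: (pre.take _ ++ pre.drop _)) := List.perm_middle
    _ = x :: pre := by rw [List.take_append_drop]

theorem insert_sorted (pre : List Int) (x : Int) (hs : pre.Pairwise (· ≤ ·)) :
    (PySem.List.insert pre (PySem.List.bisectRight pre x : Int) x).Pairwise (· ≤ ·) := by
  obtain ⟨hle, hlt, hgt⟩ := PySem.List.bisectRight_spec pre x hs
  set r := PySem.List.bisectRight pre x with hr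
  rw [insert_take_drop pre r x hle]
  have htake : ∀ a ∈ pre.take r, a ≤ x := by
    intro a ha
    obtain ⟨i, hi, hia⟩ := List.getElem_of_mem ha
    have hi' : i < pre.length := lt_of_lt_of_le hi (by simp)
    have := hlt i hi' (by simp at hi; omega)
    rw [List.getElem_take] at hia; omega
  have hdrop : ∀ a ∈ pre.drop r, x < a := by
    intro a ha
    obtain ⟨i, hi, hia⟩ := List.getElem_of_mem ha
    rw [List.getElem_drop] at hia
    have := hgt (r + i) (by simp at hi; omega) (by omega)
    omega
  rw [List.pairwise_append]
  refine ⟨hs.sublist (List.take_sublist r pre), ?_, ?_⟩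
  · rw [List.pairwise_cons]
    exact ⟨fun a ha => le_of_lt (hdrop a ha), hs.sublist (List.drop_sublist r pre)⟩
  · intro a ha b hb
    rcases List.mem_cons.mp hb with hbx | hbd
    · exact hbx ▸ htake a ha
    · exact le_trans (htake a ha) (le_of_lt (hdrop b hbd))

theorem A1_loop (rep : List Int) : ∀ (l : List Int) (i0 : Nat) (s : Int), rep.drop i0 = l →
    (PySem.List.pyRange (i0 : Int) (PySem.List.len rep) 1).foldl (fun sum i =>
      (PySem.List.pyRange (i + 1) (PySem.List.len rep) 1).foldl (fun sum j =>
        if PySem.List.pyGetD rep i 0 > PySem.List.pyGetD rep j 0 ∧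
            PySem.Int.mod (PySem.List.pyGetD rep j 0) 3 = 1 then sum + 1 else sum) sum) s
    = s + pairSum l := by
  intro l
  induction l with
  | nil =>
    intro i0 s hd
    have hlen : rep.length ≤ i0 := by
      have := congrArg List.length hd; simp at this; omega
    rw [PySem.List.pyRange_one_eq_nil (by rw [PySem.List.len_eq]; exact_mod_cast hlen)]
    simp [pairSum]
  | cons x xs ih =>
    intro i0 s hd
    have hlt : i0 < rep.length := by
      have := congrArg List.length hd; simp at this; omega
    have hx : PySem.List.pyGetD rep (i0 : Int) 0 = x := by
      rw [PySem.List.pyGetD_natCast]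
      have h0 : rep[i0]? = some x := by
        have := congrArg (fun l => l[0]?) hd
        simpa [List.getElem?_drop] using this
      simp [List.getD, h0]
    rw [PySem.List.pyRange_one_cons (by rw [PySem.List.len_eq]; exact_mod_cast hlt), List.foldl_cons]
    have hinner : ∀ (t : Int),
        (PySem.List.pyRange ((i0 : Int) + 1) (PySem.List.len rep) 1).foldl (fun sum j =>
          if PySem.List.pyGetD rep (i0 : Int) 0 > PySem.List.pyGetD rep j 0 ∧
              PySem.Int.mod (PySem.List.pyGetD rep j 0) 3 = 1 then sum + 1 else sum) t
        = t + (xs.countP (fun y => decide (x > y ∧ PySem.Int.mod y 3 = 1)) : Int) := by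
      intro t
      have h1 := PySem.List.foldl_pyRange_pyGetD rep 0
        (fun sum y => if x > y ∧ PySem.Int.mod y 3 = 1 then sum + 1 else sum) t
        (a := (i0 : Int) + 1) (by positivity)
      rw [hx]
      rw [h1]
      have hdrop : List.drop ((i0 : Int) + 1).toNat rep = xs := by
        have h2 : ((i0 : Int) + 1).toNat = i0 + 1 := by omega
        rw [h2, ← List.drop_drop, hd]; simp
      rw [hdrop]
      have := PySem.List.foldl_count_if (fun y => decide (x > y ∧ PySem.Int.mod y 3 = 1)) xs t
      simpa using this
    rw [hinner s]
    have := ih (i0 + 1) (s + (xs.countP (fun y => decide (x > y ∧ PySem.Int.mod y 3 = 1)) : Int))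
      (by rw [← List.drop_drop, hd]; simp)
    push_cast at this ⊢
    rw [this, pairSum]
    ring

theorem A2_loop (rep : List Int) : ∀ (l : List Int) (i0 : Nat) (s : Int), rep.drop i0 = l →
    (PySem.List.pyRange (i0 : Int) (PySem.List.len rep - 1) 1).foldl (fun sum i =>
      if PySem.List.pyGetD rep i 0 > PySem.List.pyGetD rep (i + 1) 0 ∧
          PySem.Int.mod (PySem.List.pyGetD rep (i + 1) 0) 3 = 0 then sum + (i + 1) else sum) s
    = s + pairsDesc l i0 := by
  intro l
  induction l with
  | nil =>
    intro i0 s hd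
    have hlen : rep.length ≤ i0 := by
      have := congrArg List.length hd; simp at this; omega
    rw [PySem.List.pyRange_one_eq_nil (by rw [PySem.List.len_eq]; omega)]
    simp [pairsDesc]
  | cons x xs ih =>
    intro i0 s hd
    match xs, ih with
    | [], _ =>
      have hlen : rep.length = i0 + 1 := by
        have := congrArg List.length hd; simp at this; omega
      rw [PySem.List.pyRange_one_eq_nil (by rw [PySem.List.len_eq]; omega)]
      simp [pairsDesc]
    | y :: rs, ih =>
      have hlen : i0 + 1 < rep.length := by
        have := congrArg List.length hd; simp at this; omega
      have hx : PySem.List.pyGetD rep (i0 : Int) 0 = x := by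
        rw [PySem.List.pyGetD_natCast]
        have h0 : rep[i0]? = some x := by
          have := congrArg (fun l => l[0]?) hd
          simpa [List.getElem?_drop] using this
        simp [List.getD, h0]
      have hy : PySem.List.pyGetD rep ((i0 : Int) + 1) 0 = y := by
        have hcast : ((i0 : Int) + 1) = ((i0 + 1 : Nat) : Int) := by push_cast; ring
        rw [hcast, PySem.List.pyGetD_natCast]
        have h1 : rep[i0 + 1]? = some y := by
          have := congrArg (fun l => l[1]?) hd
          simpa [List.getElem?_drop] using this
        simp [List.getD, h1]
      rw [PySem.List.pyRange_one_cons (by rw [PySem.List.len_eq]; omega), List.foldl_cons]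
      rw [hx, hy]
      have hih := ih (i0 + 1) (if x > y ∧ PySem.Int.mod y 3 = 0 then s + ((i0 : Int) + 1) else s)
        (by rw [← List.drop_drop, hd]; simp)
      push_cast at hih ⊢
      rw [hih, pairsDesc]
      split_ifs <;> ring

theorem B_loop : ∀ (rest done pre : List Int) (total : Int),
    pre.Pairwise (· ≤ ·) → pre.Perm done →
    ((PySem.List.enumerate rest (done.length : Int)).foldl
      (fun (st : Int × List Int × Option Int) (jx : Int × Int) =>
        let total : Int := st.1
        let pre : List Int := st.2.1
        let prev : Option Int := st.2.2
        let j : Int := jx.1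
        let x : Int := jx.2
        let pos : Nat := PySem.List.bisectRight pre x
        let total : Int := if PySem.Int.mod x 3 = 1 then total + (PySem.List.len pre - (pos : Int)) else total
        let total : Int :=
          match prev with
          | some p => if 0 < j ∧ p > x ∧ PySem.Int.mod x 3 = 0 then total + j else total
          | none => total
        (total, PySem.List.insert pre (pos : Int) x, some x))
      (total, pre, done.getLast?)).1
    = total + Cfun done rest + Dfun done.getLast? done.length rest := by
  intro rest
  induction rest with
  | nil => intro done pre total hs hp; simp [Cfun, Dfun, PySem.List.enumerate]
  | cons x rs ih =>
    intro done pre total hs hp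
    rw [PySem.List.enumerate_cons, List.foldl_cons]
    have hcnt : PySem.List.len pre - (PySem.List.bisectRight pre x : Int)
        = (done.countP (fun y => decide (x < y)) : Int) := by
      rw [count_bisect pre x hs, hp.countP_eq]
    set t1 : Int := if PySem.Int.mod x 3 = 1 then total + (PySem.List.len pre - (PySem.List.bisectRight pre x : Int)) else total with ht1
    set t2 : Int :=
      match done.getLast? with
      | some p => if 0 < (done.length : Int) ∧ p > x ∧ PySem.Int.mod x 3 = 0 then t1 + (done.length : Int) else t1
      | none => t1 with ht2
    have hlen : ((done ++ [x]).length : Int) = (done.length : Int) + 1 := by simp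
    have hmain := ih (done ++ [x]) (PySem.List.insert pre (PySem.List.bisectRight pre x : Int) x) t2
      (insert_sorted pre x hs)
      (((insert_perm pre x hs).trans (hp.cons x)).trans (List.perm_append_singleton x done).symm)
    rw [List.getLast?_concat, hlen] at hmain
    refine Eq.trans hmain ?_
    simp only [Cfun, Dfun, List.length_append, List.length_cons, List.length_nil]
    rcases hdone : done.getLast? with _ | p
    · have hnil : done = [] := List.getLast?_eq_none_iff.mp hdone
      subst hnil
      simp only [ht2, ht1, hdone, cntC, hcnt]
      split_ifs <;> simp
    · simp only [ht2, ht1, hdone, cntC, hcnt]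
      have hpos : (0:Int) < (done.length : Int) := by
        have hne : done ≠ [] := by intro h; rw [h] at hdone; simp at hdone
        have := List.length_pos_iff.mpr hne
        exact_mod_cast this
      split_ifs <;> push_cast <;> omega

theorem cntC_eq (x : Int) (done : List Int) :
    cntC x done = (done.countP (fun d => decide (d > x ∧ PySem.Int.mod x 3 = 1)) : Int) := by
  unfold cntC
  by_cases h : PySem.Int.mod x 3 = 1
  · rw [if_pos h]
    congr 1
    apply List.countP_congr
    intro d _
    simp only [decide_eq_true_eq, h, and_true, gt_iff_lt]
  · rw [if_neg h]
    have hz : done.countP (fun d => decide (d > x ∧ PySem.Int.mod x 3 = 1)) = 0 := by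
      rw [List.countP_eq_zero]; intro d _
      simp only [decide_eq_true_eq, not_and]
      intro _; exact h
    rw [hz]; simp

theorem C_exchange : ∀ (rest done : List Int), Cfun done rest = crossSum done rest + pairSum rest := by
  intro rest
  induction rest with
  | nil => intro done; simp [Cfun, crossSum, pairSum]
  | cons x rs ih =>
    intro done
    rw [Cfun, ih (done ++ [x]), pairSum, cntC_eq]
    have hsplit : crossSum (done ++ [x]) rs
        = crossSum done rs + (rs.countP (fun y => decide (x > y ∧ PySem.Int.mod y 3 = 1)) : Int) := by
      unfold crossSum
      rw [List.map_append, List.sum_append]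
      simp
    have hcons : crossSum done (x :: rs)
        = (done.countP (fun d => decide (d > x ∧ PySem.Int.mod x 3 = 1)) : Int) + crossSum done rs := by
      unfold crossSum
      have hmap : ∀ d : Int, ((x :: rs).countP (fun y => decide (d > y ∧ PySem.Int.mod y 3 = 1)) : Int)
          = (rs.countP (fun y => decide (d > y ∧ PySem.Int.mod y 3 = 1)) : Int)
            + (if d > x ∧ PySem.Int.mod x 3 = 1 then 1 else 0) := by
        intro d
        rw [List.countP_cons]
        by_cases h : x < d ∧ PySem.Int.mod x 3 = 1
        · have hd : decide (d > x ∧ PySem.Int.mod x 3 = 1) = true := by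
            simp only [decide_eq_true_eq]; exact ⟨h.1, h.2⟩
          rw [hd, if_pos (show d > x ∧ PySem.Int.mod x 3 = 1 from ⟨h.1, h.2⟩)]
          simp [add_comm]
        · have hd : decide (d > x ∧ PySem.Int.mod x 3 = 1) = false := by
            simp only [decide_eq_false_iff_not]; exact fun hc => h ⟨hc.1, hc.2⟩
          rw [hd, if_neg (fun hc : d > x ∧ PySem.Int.mod x 3 = 1 => h ⟨hc.1, hc.2⟩)]
          simp
      calc (done.map (fun d => ((x :: rs).countP (fun y => decide (d > y ∧ PySem.Int.mod y 3 = 1)) : Int))).sum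
          = (done.map (fun d => (rs.countP (fun y => decide (d > y ∧ PySem.Int.mod y 3 = 1)) : Int)
              + (if d > x ∧ PySem.Int.mod x 3 = 1 then 1 else 0))).sum := by
            congr 1; apply List.map_congr_left; intro d _; exact hmap d
        _ = (done.map (fun d => (rs.countP (fun y => decide (d > y ∧ PySem.Int.mod y 3 = 1)) : Int))).sum
              + (done.map (fun d => (if d > x ∧ PySem.Int.mod x 3 = 1 then (1:Int) else 0))).sum := by
            rw [PySem.List.sum_map_add_int]
        _ = (done.countP (fun d => decide (d > x ∧ PySem.Int.mod x 3 = 1)) : Int) + crossSum done rs := by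
            rw [crossSum]
            have hio := PySem.List.sum_map_ite_one_zero (fun d => decide (d > x ∧ PySem.Int.mod x 3 = 1)) done
            simp only [decide_eq_true_eq] at hio
            rw [hio]
            ring
    rw [hcons, hsplit]
    ring

theorem D_shift : ∀ (rs : List Int) (x : Int) (j : Nat),
    Dfun (some x) (j + 1) rs = pairsDesc (x :: rs) j := by
  intro rs
  induction rs with
  | nil => intro x j; simp [Dfun, pairsDesc]
  | cons y rs' ih =>
    intro x j
    rw [Dfun, ih y (j + 1), pairsDesc]
    push_cast
    ring_nf

theorem D_eq_pairsDesc (rep : List Int) : Dfun none 0 rep = pairsDesc rep 0 := by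
  cases rep with
  | nil => simp [Dfun, pairsDesc]
  | cons x rs => rw [Dfun]; simpa using D_shift rs x 0

-- ===== VERDICT (by name: the statement is the Claim_ definition above) =====
theorem stat_third_spec : Claim_equal_stat_third := by
  intro rep k _
  unfold Spec_stat_third
  have hA1 := A1_loop rep rep 0 0 (by simp)
  have hA2 := A2_loop rep rep 0 (pairSum rep) (by simp)
  push_cast at hA1 hA2
  have hA : stat_third rep k = pairSum rep + pairsDesc rep 0 := by
    unfold stat_third
    rw [hA1, zero_add]
    exact hA2
  have hB0 := B_loop rep [] [] 0 (by simp) (List.Perm.refl _)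
  have hB : stat_third_alt rep k = Cfun [] rep + Dfun none 0 rep := by
    unfold stat_third_alt
    simpa using hB0
  rw [hA, hB, C_exchange rep [], D_eq_pairsDesc]
  simp [crossSum]
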